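-- pv_equiv track=rewrite | github.com/vslch/google-kickstart | 2020-round-A/workout.py | solution
-- ===== SOURCE A (Python) =====
-- def solution(N, K, S):
--
-- 	prev = S[0]
--
-- 	for i in range(1, N):
-- 		dist = S[i] - prev
-- 		prev = S[i]
-- 		S[i] = dist
--
-- 	maxDist = max(S[1:])
-- 	condition = lambda d: sum(z // d - 1 * int(z % d == 0) for z in S[1:]) <= K
-- 	left = 1
-- 	right = maxDist
--
-- 	while (left != right):
-- 		mid = (left + right) // 2
-- 		if condition(mid) == True:
-- 			right = mid
-- 		else:
-- 			left = right if left == mid else mid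
--
-- 	return left
-- ===== SOURCE B (Python) =====
-- def solution(N, K, S):
--     # turn S into [first point, gap, gap, ...] in place, back to front
--     for i in range(N - 1, 0, -1):
--         S[i] -= S[i - 1]
--     gaps = S[1:]
--     top = max(gaps)
--
--     def cuts(d):
--         return sum((g + d - 1) // d - 1 for g in gaps)
--
--     # every achievable piece size is t or ceil(g/t) for some t up to sqrt(g)
--     cands = set()
--     for g in gaps:
--         t = 1
--         while (t - 1) * (t - 1) < g:
--             cands.add(t)
--             cands.add((g + t - 1) // t)
--             t += 1
--     return next((d for d in sorted(cands) if cuts(d) <= K), top)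
-- ===== Notes on version B (the rewrite author's own statement) =====
-- stated objective: alternative
-- what changed: B keeps the in-place gap rewrite (done back to front, without A's running prev variable) but replaces A's binary search over the answer range by enumerating the O(sqrt(gap)) achievable piece sizes into a set, sorting them, and scanning for the first feasible one; Pre_ excludes inputs whose gap list has a negative entry or no positive entry (unsorted or degenerate point lists), where A raises, loops, or returns an artefact of probing a non-monotone predicate.
-- outside the precondition, e.g. on solution(4, -4, [3, 1, 15, -1]): A returns 14, B returns 1; on solution(5, -3, [-1, 7, -4, 1, 1]): A returns 8, B returns 5
import Mathlib
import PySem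

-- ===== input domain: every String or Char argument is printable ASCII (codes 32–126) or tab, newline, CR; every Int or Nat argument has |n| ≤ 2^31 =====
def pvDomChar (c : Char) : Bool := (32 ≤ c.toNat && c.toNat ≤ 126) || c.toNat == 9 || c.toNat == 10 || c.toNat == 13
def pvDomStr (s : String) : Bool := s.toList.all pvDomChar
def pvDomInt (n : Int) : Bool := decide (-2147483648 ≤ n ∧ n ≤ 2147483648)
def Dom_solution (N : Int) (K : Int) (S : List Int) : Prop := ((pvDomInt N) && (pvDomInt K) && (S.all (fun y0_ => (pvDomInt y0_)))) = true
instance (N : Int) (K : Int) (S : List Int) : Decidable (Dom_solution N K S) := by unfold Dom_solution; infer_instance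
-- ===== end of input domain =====

-- B replaces A's forward difference loop and binary search over the answer range by a
-- back-to-front in-place differencing, an enumeration of the achievable piece sizes into a
-- set, and a scan of the sorted candidates for the first feasible one (objective: alternative).
-- A mutates its argument S in place (overwrites S[1:N] with consecutive gaps); B performs the
-- same mutation; the equivalence proved here is about the RETURN value.

-- ===== PORT A =====
-- one step of A's mutation loop 'for i in range(1, N)': state = (current list, prev).
-- S[i] is read with pyGetD: under Pre_solution every index 1 ≤ i < N ≤ len(S) is in range,
-- so the default is never taken (outside Pre_, where Python raises IndexError, nothing is claimed).
def stepA (st : List Int × Int) (i : Int) : List Int × Int :=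
  let dist := PySem.List.pyGetD st.1 i 0 - st.2
  let prev := PySem.List.pyGetD st.1 i 0
  (PySem.List.pySetD st.1 i dist, prev)

-- condition = lambda d: sum(z // d - 1 * int(z % d == 0) for z in S[1:]) <= K
def condA (T : List Int) (K : Int) (d : Int) : Bool :=
  decide (((PySem.List.slice T (some 1) none).map
      (fun z => PySem.Int.floordiv z d - 1 * (if PySem.Int.mod z d = 0 then 1 else 0))).sum ≤ K)

-- while (left != right): …  — fuel recursion; under Pre_solution the interval width strictly
-- decreases each iteration, so fuel (right-left).toNat + 1 is never exhausted there.
def loopA (T : List Int) (K : Int) : Nat → Int → Int → Int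
  | 0, l, _ => l
  | fuel + 1, l, r =>
    if l = r then l
    else
      let mid := PySem.Int.floordiv (l + r) 2
      if condA T K mid then loopA T K fuel l mid
      else if l = mid then loopA T K fuel r r
      else loopA T K fuel mid r

def solution (N : Int) (K : Int) (S : List Int) : Int :=
  let prev := PySem.List.pyGetD S 0 0
  let T := ((PySem.List.pyRange 1 N 1).foldl stepA (S, prev)).1
  match PySem.List.max? (PySem.List.slice T (some 1) none) (fun z => z) with
  | none => 0   -- max([]) raises ValueError in Python: excluded by Pre_solution
  | some maxDist => loopA T K ((maxDist - 1).toNat + 1) 1 maxDist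

-- ===== PORT B =====
-- for i in range(N - 1, 0, -1): S[i] -= S[i - 1]   (back-to-front in-place differencing)
def stepB (L : List Int) (i : Int) : List Int :=
  PySem.List.pySetD L i (PySem.List.pyGetD L i 0 - PySem.List.pyGetD L (i - 1) 0)

-- (z + d - 1) // d
def ceilDiv (z : Int) (d : Int) : Int := PySem.Int.floordiv (z + d - 1) d

-- cuts(d) = sum((g + d - 1) // d - 1 for g in gaps)
def cutsB (zs : List Int) (d : Int) : Int :=
  (zs.map (fun g => ceilDiv g d - 1)).sum

-- t = 1; while (t - 1) * (t - 1) < g: add t; add ceil(g/t); t += 1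
-- fuel recursion as for loopA: with fuel g.toNat + 1 the condition fails before fuel runs out
def enumFrom (g : Int) : Nat → Int → PySem.Set Int → PySem.Set Int
  | 0, _, c => c
  | fuel + 1, t, c =>
    if (t - 1) * (t - 1) < g then
      enumFrom g fuel (t + 1) (PySem.Set.add (PySem.Set.add c t) (ceilDiv g t))
    else c

-- for g in gaps: (the while loop above), into one shared set
def buildCands (zs : List Int) : PySem.Set Int :=
  zs.foldl (fun c g => enumFrom g (g.toNat + 1) 1 c) PySem.Set.empty

-- next((d for d in sorted(cands) if cuts(d) <= K), top)
def pickB (cs : List Int) (zs : List Int) (K : Int) (top : Int) : Int :=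
  (cs.find? (fun d => decide (cutsB zs d ≤ K))).getD top

def solution_alt (N : Int) (K : Int) (S : List Int) : Int :=
  let T := (PySem.List.pyRange (N - 1) 0 (-1)).foldl stepB S
  let zs := PySem.List.slice T (some 1) none
  match PySem.List.max? zs (fun z => z) with
  | none => 0   -- max([]) raises ValueError in Python: excluded by Pre_solution
  | some top =>
    pickB (PySem.List.sorted (buildCands zs) (fun x => x) false) zs K top


-- ===== PRECONDITION & SPEC =====
-- the consecutive-gap list A's mutation produces and then searches over: the differences of the
-- first max(N,1) elements followed by the untouched tail (defined from the input only)
def pvGapsSpec (N : Int) (S : List Int) : List Int :=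
  List.zipWith (fun a b => b - a) (S.take (max N 1).toNat) (S.take (max N 1).toNat).tail
    ++ S.drop (max N 1).toNat

-- Pre_solution excludes: N > len(S) (IndexError) and len(S) < 2 (ValueError on max([])); and the
-- inputs whose gap list has a negative entry or no positive entry — there the predicate A bisects
-- is not monotone (or the search interval [1, max gap] is empty), so A raises ZeroDivisionError,
-- loops forever, or returns a value that is an artefact of its probe sequence, a corner on which
-- no particular result is the specified one; B returns the least feasible candidate there.
def Pre_solution (N : Int) (K : Int) (S : List Int) : Prop :=
  2 ≤ S.length ∧ N ≤ (S.length : Int) ∧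
    (∀ z ∈ pvGapsSpec N S, 0 ≤ z) ∧ (∃ z ∈ pvGapsSpec N S, 1 ≤ z)
instance (N : Int) (K : Int) (S : List Int) : Decidable (Pre_solution N K S) := by
  unfold Pre_solution; infer_instance

def pvWitness_solution : Int × Int × List Int := (4, 2, [1, 3, 7, 10])

def Spec_solution (N : Int) (K : Int) (S : List Int) (out : Int) : Prop := out = solution_alt N K S
instance (N : Int) (K : Int) (S : List Int) (out : Int) : Decidable (Spec_solution N K S out) := by
  unfold Spec_solution; infer_instance

-- ===== CLAIM (what is proved, stated in full; the proofs are below) =====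
def Claim_equal_solution : Prop := ∀ (N : Int) (K : Int) (S : List Int), Dom_solution N K S → Pre_solution N K S → Spec_solution N K S (solution N K S)

-- ===== LEMMAS AND PROOFS =====

-- t stays ≤ g while the loop runs (so the fuel below never runs out)
theorem enum_cond_le {g t : Int} (h : (t - 1) * (t - 1) < g) : t ≤ g := by
  by_cases h1 : t ≤ 1
  · nlinarith [mul_self_nonneg (t - 1)]
  · nlinarith [mul_nonneg (by omega : (0:Int) ≤ t - 1) (by omega : (0:Int) ≤ t - 2)]


theorem ceil_le_iff {z d k : Int} (hz : 0 ≤ z) (hd : 1 ≤ d) : ceilDiv z d ≤ k ↔ z ≤ k * d := by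
  unfold ceilDiv
  rw [PySem.Int.floordiv_eq_ediv_of_pos (by omega)]
  have h := Int.ediv_add_emod (z + d - 1) d
  rw [mul_comm] at h
  have hr0 := Int.emod_nonneg (z + d - 1) (by omega : d ≠ 0)
  have hrd := Int.emod_lt_of_pos (z + d - 1) (by omega : 0 < d)
  set q := (z + d - 1) / d with hq
  set r := (z + d - 1) % d with hr
  constructor
  · intro hqk
    have h1 : q * d ≤ k * d := mul_le_mul_of_nonneg_right hqk (by omega)
    omega
  · intro hzk
    by_contra hqk
    push_neg at hqk
    have h1 : (k + 1) * d ≤ q * d := mul_le_mul_of_nonneg_right (by omega) (by omega)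
    nlinarith

theorem ceil_nonneg {z d : Int} (hz : 0 ≤ z) (hd : 1 ≤ d) : 0 ≤ ceilDiv z d := by
  by_contra h
  have h2 : ceilDiv z d ≤ -1 := by omega
  have := (ceil_le_iff hz hd).mp h2
  nlinarith

theorem ceil_pos {z d : Int} (hz : 1 ≤ z) (hd : 1 ≤ d) : 1 ≤ ceilDiv z d := by
  by_contra h
  have h2 : ceilDiv z d ≤ 0 := by omega
  have h3 := (ceil_le_iff (by omega) hd).mp h2
  simp at h3
  omega

theorem ceil_le_self {z d : Int} (hz : 0 ≤ z) (hd : 1 ≤ d) : ceilDiv z d ≤ z := by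
  exact (ceil_le_iff hz hd).mpr (by nlinarith)

theorem ceil_refl_le {z d : Int} (hz : 0 ≤ z) (hd : 1 ≤ d) : z ≤ ceilDiv z d * d :=
  (ceil_le_iff hz hd).mp le_rfl

theorem ceil_anti {z d d' : Int} (hz : 0 ≤ z) (hd : 1 ≤ d) (hdd : d ≤ d') : ceilDiv z d' ≤ ceilDiv z d := by
  have h1 : z ≤ ceilDiv z d * d := ceil_refl_le hz hd
  have h2 : ceilDiv z d * d ≤ ceilDiv z d * d' :=
    mul_le_mul_of_nonneg_left hdd (ceil_nonneg hz hd)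
  exact (ceil_le_iff hz (by omega)).mpr (by omega)

theorem termA_eq {z d : Int} (hd : 1 ≤ d) :
    PySem.Int.floordiv z d - 1 * (if PySem.Int.mod z d = 0 then 1 else 0) = ceilDiv z d - 1 := by
  rw [PySem.Int.floordiv_eq_ediv_of_pos (by omega), PySem.Int.mod_eq_emod_of_pos (by omega)]
  unfold ceilDiv
  rw [PySem.Int.floordiv_eq_ediv_of_pos (by omega)]
  have h := Int.ediv_add_emod z d
  rw [mul_comm] at h
  have hr0 := Int.emod_nonneg z (by omega : d ≠ 0)
  have hrd := Int.emod_lt_of_pos z (by omega : 0 < d)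
  set q := z / d with hq
  set r := z % d with hr
  by_cases h0 : r = 0
  · have he : (z + d - 1) / d = q := by
      rw [show z + d - 1 = d - 1 + q * d by omega]
      rw [Int.add_mul_ediv_right _ _ (by omega : d ≠ 0)]
      rw [Int.ediv_eq_zero_of_lt (by omega) (by omega)]
      omega
    rw [he]
    simp [h0]
  · have he : (z + d - 1) / d = q + 1 := by
      have hexp : (q + 1) * d = q * d + d := by ring
      rw [show z + d - 1 = r - 1 + (q + 1) * d by omega]
      rw [Int.add_mul_ediv_right _ _ (by omega : d ≠ 0)]
      rw [Int.ediv_eq_zero_of_lt (by omega) (by omega)]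
      omega
    rw [he]
    simp [h0]

theorem cutsB_eq (zs : List Int) (d : Int) :
    cutsB zs d = (zs.map (fun g => ceilDiv g d)).sum - zs.length := by
  unfold cutsB
  have hmap : zs.map (fun g => ceilDiv g d - 1) = zs.map (fun g => ceilDiv g d + (-1)) :=
    List.map_congr_left (fun z _ => by ring)
  rw [hmap, PySem.List.sum_map_add_int, PySem.List.sum_map_const_int]
  omega

theorem cuts_anti {zs : List Int} {d d' : Int} (hz : ∀ z ∈ zs, 0 ≤ z) (hd : 1 ≤ d)
    (hdd : d ≤ d') : cutsB zs d' ≤ cutsB zs d := by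
  rw [cutsB_eq, cutsB_eq]
  have := List.sum_le_sum (l := zs) (f := fun z => ceilDiv z d') (g := fun z => ceilDiv z d)
    (fun z hzm => ceil_anti (hz z hzm) hd hdd)
  omega

theorem cuts_exists_strict {zs : List Int} {d : Int} (hz : ∀ z ∈ zs, 0 ≤ z) (hd : 1 ≤ d)
    (hlt : cutsB zs (d + 1) < cutsB zs d) :
    ∃ z ∈ zs, ceilDiv z (d + 1) < ceilDiv z d := by
  apply List.exists_lt_of_sum_lt
  rw [cutsB_eq, cutsB_eq] at hlt
  omega


def IsRes (zs : List Int) (K : Int) (top : Int) (r : Int) : Prop :=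
  1 ≤ r ∧ r ≤ top ∧ (cutsB zs r ≤ K ∨ r = top) ∧
    ∀ d : Int, 1 ≤ d → d < r → ¬ cutsB zs d ≤ K

theorem isRes_unique {zs : List Int} {K top r1 r2 : Int}
    (h1 : IsRes zs K top r1) (h2 : IsRes zs K top r2) : r1 = r2 := by
  obtain ⟨a1, b1, c1, m1⟩ := h1
  obtain ⟨a2, b2, c2, m2⟩ := h2
  rcases lt_trichotomy r1 r2 with h | h | h
  · have := m2 r1 a1 h
    rcases c1 with hc | hc
    · exact absurd hc this
    · omega
  · exact h
  · have := m1 r2 a2 h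
    rcases c2 with hc | hc
    · exact absurd hc this
    · omega

theorem condA_iff {T : List Int} {K d : Int} (hd : 1 ≤ d) :
    condA T K d = true ↔ cutsB T.tail d ≤ K := by
  unfold condA cutsB
  rw [PySem.List.slice_from_one, decide_eq_true_iff]
  have hmap : (T.tail.map
      (fun z => PySem.Int.floordiv z d - 1 * (if PySem.Int.mod z d = 0 then 1 else 0)))
      = T.tail.map (fun g => ceilDiv g d - 1) := by
    exact List.map_congr_left (fun z _ => by rw [termA_eq hd])
  rw [hmap]

theorem loopA_isRes (zs : List Int) (K top : Int) (T : List Int) (hT : T.tail = zs)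
    (hz : ∀ z ∈ zs, 0 ≤ z) :
    ∀ (fuel : Nat) (l r : Int), (r - l).toNat < fuel → 1 ≤ l → l ≤ r → r ≤ top →
      (cutsB zs r ≤ K ∨ r = top) → (∀ d : Int, 1 ≤ d → d < l → ¬ cutsB zs d ≤ K) →
      IsRes zs K top (loopA T K fuel l r) := by
  intro fuel
  induction fuel with
  | zero => intro l r hf; omega
  | succ n ih =>
    intro l r hf hl1 hlr hrt hcr hmin
    rw [loopA]
    by_cases heq : l = r
    · subst heq
      simp only [if_pos rfl]
      exact ⟨hl1, hrt, hcr, hmin⟩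
    · simp only [if_neg heq]
      have hlr' : l < r := by omega
      have hmb := PySem.Int.floordiv_two_mid_bounds (le_of_lt hlr')
      have hme : PySem.Int.floordiv (l + r) 2 = (l + r) / 2 :=
        PySem.Int.floordiv_eq_ediv_of_pos (by omega)
      set mid := PySem.Int.floordiv (l + r) 2 with hmid
      have hmlt : mid < r := by omega
      have hm1 : 1 ≤ mid := by omega
      by_cases hc : condA T K mid = true
      · simp only [hc, if_true]
        have hcm : cutsB zs mid ≤ K := by
          rw [← hT]; exact (condA_iff hm1).mp hc
        exact ih l mid (by omega) hl1 (by omega) (by omega) (Or.inl hcm) hmin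
      · rw [Bool.not_eq_true] at hc
        simp only [hc, if_false]
        have hncm : ¬ cutsB zs mid ≤ K := by
          intro hcon
          have : condA T K mid = true := (condA_iff hm1).mpr (by rw [hT]; exact hcon)
          rw [hc] at this
          exact Bool.false_ne_true this
        by_cases hlm : l = mid
        · rw [if_pos hlm]
          have hreq : r = l + 1 := by omega
          refine ih r r (by omega) (by omega) le_rfl hrt hcr ?_
          intro d hd1 hdr
          by_cases hdl : d < l
          · exact hmin d hd1 hdl
          · have : d = mid := by omega
            rw [this]; exact hncm
        · rw [if_neg hlm]
          have hlm' : l < mid := by omega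
          refine ih mid r (by omega) (by omega) (by omega) hrt hcr ?_
          intro d hd1 hdm
          intro hcon
          exact hncm (le_trans (cuts_anti hz hd1 (by omega)) hcon)

def dDiffsN (S : List Int) (m : Nat) : List Int :=
  List.zipWith (fun a b => b - a) (S.take m) (S.take m).tail

theorem length_dDiffsN (S : List Int) (m : Nat) (hm : m ≤ S.length) (h1 : 1 ≤ m) :
    (dDiffsN S m).length = m - 1 := by
  unfold dDiffsN
  simp [List.length_zipWith, List.length_take]
  omega

theorem getElem_dDiffsN (S : List Int) (m : Nat) (i : Nat) (hm : m ≤ S.length)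
    (hi : i + 1 < m) (h : i < (dDiffsN S m).length) :
    (dDiffsN S m)[i] = S[i + 1]'(by omega) - S[i]'(by omega) := by
  unfold dDiffsN
  simp only [List.getElem_zipWith, List.getElem_take, List.getElem_tail]

theorem dDiffsN_succ (S : List Int) (m : Nat) (h1 : 1 ≤ m) (hm : m < S.length) :
    dDiffsN S (m + 1) = dDiffsN S m ++ [S[m] - S[m - 1]'(by omega)] := by
  apply List.ext_getElem
  · rw [length_dDiffsN S (m+1) (by omega) (by omega), List.length_append,
      length_dDiffsN S m (by omega) h1]
    simp
    omega
  · intro i hL hR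
    rw [length_dDiffsN S (m+1) (by omega) (by omega)] at hL
    rw [getElem_dDiffsN S (m+1) i (by omega) (by omega) _]
    by_cases him : i + 1 < m
    · rw [List.getElem_append_left (by have := length_dDiffsN S m (by omega) h1; omega)]
      rw [getElem_dDiffsN S m i (by omega) him _]
    · have him' : i = m - 1 := by omega
      subst him'
      rw [List.getElem_append_right (by have := length_dDiffsN S m (by omega) h1; omega)]
      simp [length_dDiffsN S m (by omega) h1, show m - 1 + 1 = m from by omega]

theorem dDiffsN_one (S : List Int) : dDiffsN S 1 = [] := by
  unfold dDiffsN
  cases S with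
  | nil => simp
  | cons a t => simp

theorem getD_mid (S : List Int) (m : Nat) (h1 : 1 ≤ m) (hm : m < S.length) :
    (S.take 1 ++ dDiffsN S m ++ S.drop m).getD m 0 = S.getD m 0 := by
  have hlen : (S.take 1 ++ dDiffsN S m).length = m := by
    rw [List.length_append, List.length_take, length_dDiffsN S m (by omega) h1]
    omega
  rw [List.getD_eq_getElem?_getD, List.getD_eq_getElem?_getD]
  rw [List.getElem?_append_right (by omega)]
  rw [hlen]
  simp [List.getElem?_drop]

theorem mut_invariant (S : List Int) (N : Int) (hN : N ≤ (S.length : Int)) :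
    ∀ k : Nat, (1 + (k : Int)) ≤ N →
      (PySem.List.pyRange 1 (1 + (k : Int))).foldl stepA (S, PySem.List.pyGetD S 0 0)
        = (S.take 1 ++ dDiffsN S (1 + k) ++ S.drop (1 + k), S.getD k 0) := by
  intro k
  induction k with
  | zero =>
    intro hk
    have hrange : PySem.List.pyRange 1 (1 + ((0 : Nat) : Int)) = [] :=
      PySem.List.pyRange_one_eq_nil (by omega)
    rw [hrange]
    simp only [List.foldl_nil]
    have hfix : S.take 1 ++ dDiffsN S (1 + 0) ++ S.drop (1 + 0) = S := by
      simp only [Nat.add_zero, dDiffsN_one, List.append_nil]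
      exact List.take_append_drop 1 S
    rw [hfix, PySem.List.pyGetD_of_nonneg S 0 (by omega)]
    rfl
  | succ k ih =>
    intro hk
    have hk' : (1 + (k : Int)) ≤ N := by push_cast at hk ⊢; omega
    have hcast : (1 + ((k + 1 : Nat) : Int)) = (1 + (k : Int)) + 1 := by push_cast; ring
    rw [hcast, PySem.List.pyRange_one_succ_right (by omega), List.foldl_append, ih hk']
    simp only [List.foldl_cons, List.foldl_nil]
    set m : Nat := 1 + k with hm
    have hmN : ((m : Int)) < N := by push_cast [hm] at hk ⊢; omega
    have hmS : m < S.length := by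
      have := hN
      omega
    have hm1 : 1 ≤ m := by omega
    have hcast2 : (1 + (k : Int)) = ((m : Int)) := by push_cast [hm]; ring
    rw [hcast2]
    unfold stepA
    simp only
    have hget : PySem.List.pyGetD (S.take 1 ++ dDiffsN S m ++ S.drop m) ((m : Int)) 0
        = S.getD m 0 := by
      rw [PySem.List.pyGetD_of_nonneg _ _ (by omega)]
      rw [Int.toNat_natCast]
      exact getD_mid S m hm1 hmS
    rw [hget]
    simp only [Prod.mk.injEq]
    refine ⟨?_, ?_⟩
    · -- the list component
      rw [PySem.List.pySetD_of_nonneg _ _ (by omega), Int.toNat_natCast]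
      have hlen : (S.take 1 ++ dDiffsN S m).length = m := by
        rw [List.length_append, List.length_take, length_dDiffsN S m (by omega) hm1]
        omega
      rw [List.set_append, if_neg (by omega), hlen]
      rw [List.drop_eq_getElem_cons hmS]
      simp only [Nat.sub_self, List.set_cons_zero]
      simp only [show (1 : Nat) + (k + 1) = m + 1 from by omega]
      rw [dDiffsN_succ S m hm1 hmS]
      rw [List.getD_eq_getElem S 0 hmS, List.getD_eq_getElem S 0 (show k < S.length by omega)]
      simp only [show m - 1 = k from by omega]
      simp only [List.append_assoc, List.cons_append, List.nil_append]
    · -- the prev component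
      rw [List.getD_eq_getElem S 0 hmS, List.getD_eq_getElem S 0 (show k + 1 < S.length by omega)]
      congr 1
      omega

theorem mutation_tail (S : List Int) (N : Int) (h2 : 2 ≤ S.length) (hN : N ≤ (S.length : Int)) :
    (((PySem.List.pyRange 1 N).foldl stepA (S, PySem.List.pyGetD S 0 0)).1).tail
      = pvGapsSpec N S := by
  by_cases hN1 : N ≤ 1
  · rw [PySem.List.pyRange_one_eq_nil hN1]
    simp only [List.foldl_nil]
    unfold pvGapsSpec
    have hmax : (max N 1).toNat = 1 := by omega
    rw [hmax]
    have : List.zipWith (fun a b => b - a) (S.take 1) (S.take 1).tail = [] := by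
      cases S with
      | nil => simp
      | cons a t => simp
    rw [this, List.nil_append]
    rw [← List.drop_one]
  · have hN2 : 2 ≤ N := by omega
    set k : Nat := (N - 1).toNat with hk
    have hNk : N = 1 + (k : Int) := by omega
    rw [hNk, mut_invariant S N hN k (by omega)]
    simp only
    have hmax : (max (1 + (k : Int)) 1).toNat = 1 + k := by omega
    unfold pvGapsSpec
    rw [hmax]
    have htake : S.take 1 = [S[0]'(by omega)] := by
      cases S with
      | nil => simp at h2
      | cons a t => simp
    rw [htake]
    simp only [List.cons_append, List.nil_append, List.tail_cons]
    rfl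

-- B's back-to-front mutation produces the same list as A's forward loop
theorem getD_take_append (S R : List Int) (m i : Nat) (hi : i < m) (hil : i < S.length) :
    (S.take m ++ R).getD i 0 = S.getD i 0 := by
  rw [List.getD_eq_getElem?_getD, List.getD_eq_getElem?_getD,
    List.getElem?_append_left (by rw [List.length_take]; omega),
    List.getElem?_take_of_lt hi]

theorem mutB_inv (S : List Int) (N : Int) (hN : N ≤ (S.length : Int)) (hN2 : 2 ≤ N) :
    ∀ j : Nat, (j : Int) + 1 ≤ N →
      (PySem.List.pyRange ((j : Int)) 0 (-1)).foldl stepB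
        (S.take (j + 1) ++ (dDiffsN S N.toNat).drop j ++ S.drop N.toNat)
      = S.take 1 ++ dDiffsN S N.toNat ++ S.drop N.toNat := by
  intro j
  induction j with
  | zero =>
    intro _
    rw [show ((0 : Nat) : Int) = 0 by norm_num, PySem.List.pyRange_neg_one_eq_nil le_rfl]
    simp
  | succ j ih =>
    intro hj
    have hj2 : (j : Int) + 2 ≤ N := by push_cast at hj ⊢; omega
    have hjlen : j + 2 ≤ S.length := by omega
    have hDlen : (dDiffsN S N.toNat).length = N.toNat - 1 :=
      length_dDiffsN S N.toNat (by omega) (by omega)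
    rw [show ((j + 1 : Nat) : Int) = (j : Int) + 1 by push_cast; ring,
      PySem.List.pyRange_neg_one_cons (by omega : (0 : Int) < (j : Int) + 1), List.foldl_cons]
    have hg1 : PySem.List.pyGetD
        (S.take (j + 1 + 1) ++ (dDiffsN S N.toNat).drop (j + 1) ++ S.drop N.toNat)
        ((j : Int) + 1) 0 = S.getD (j + 1) 0 := by
      rw [PySem.List.pyGetD_of_nonneg _ _ (by omega),
        show ((j : Int) + 1).toNat = j + 1 by omega, List.append_assoc]
      exact getD_take_append S _ (j + 1 + 1) (j + 1) (by omega) (by omega)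
    have hg0 : PySem.List.pyGetD
        (S.take (j + 1 + 1) ++ (dDiffsN S N.toNat).drop (j + 1) ++ S.drop N.toNat)
        ((j : Int) + 1 - 1) 0 = S.getD j 0 := by
      rw [show (j : Int) + 1 - 1 = ((j : Nat) : Int) by ring,
        PySem.List.pyGetD_of_nonneg _ _ (by omega), Int.toNat_natCast, List.append_assoc]
      exact getD_take_append S _ (j + 1 + 1) j (by omega) (by omega)
    have hstep : stepB
        (S.take (j + 1 + 1) ++ (dDiffsN S N.toNat).drop (j + 1) ++ S.drop N.toNat)
        ((j : Int) + 1)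
        = S.take (j + 1) ++ (dDiffsN S N.toNat).drop j ++ S.drop N.toNat := by
      unfold stepB
      rw [hg1, hg0, PySem.List.pySetD_of_nonneg _ _ (by omega),
        show ((j : Int) + 1).toNat = j + 1 by omega]
      rw [List.append_assoc, List.set_append, if_pos (by rw [List.length_take]; omega)]
      rw [show S.take (j + 1 + 1) = S.take (j + 1) ++ [S[j + 1]'(by omega)] by
        rw [← List.take_concat_get' S (j + 1) (by omega)]]
      rw [List.set_append, if_neg (by rw [List.length_take]; omega)]
      have hsetlen : (S.take (j + 1)).length = j + 1 := by rw [List.length_take]; omega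
      rw [hsetlen, show j + 1 - (j + 1) = 0 by omega, List.set_cons_zero]
      have hdrop : (dDiffsN S N.toNat).drop j
          = (S[j + 1]'(by omega) - S[j]'(by omega)) :: (dDiffsN S N.toNat).drop (j + 1) := by
        rw [List.drop_eq_getElem_cons (by omega : j < (dDiffsN S N.toNat).length)]
        congr 1
        exact getElem_dDiffsN S N.toNat j (by omega) (by omega) (by omega)
      rw [List.getD_eq_getElem S 0 (by omega), List.getD_eq_getElem S 0 (by omega), hdrop]
      simp [List.append_assoc]
    rw [hstep, show (j : Int) + 1 - 1 = ((j : Nat) : Int) by ring]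
    exact ih (by omega)

theorem mutB_tail (S : List Int) (N : Int) (h2 : 2 ≤ S.length) (hN : N ≤ (S.length : Int)) :
    ((PySem.List.pyRange (N - 1) 0 (-1)).foldl stepB S).tail = pvGapsSpec N S := by
  by_cases hN1 : N ≤ 1
  · rw [PySem.List.pyRange_neg_one_eq_nil (by omega)]
    simp only [List.foldl_nil]
    unfold pvGapsSpec
    have hmax : (max N 1).toNat = 1 := by omega
    rw [hmax]
    have : List.zipWith (fun a b => b - a) (S.take 1) (S.take 1).tail = [] := by
      cases S with
      | nil => simp
      | cons a t => simp
    rw [this, List.nil_append, ← List.drop_one]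
  · have hN2 : 2 ≤ N := by omega
    set j0 : Nat := (N - 1).toNat with hj0
    have hstart : S = S.take (j0 + 1) ++ (dDiffsN S N.toNat).drop j0 ++ S.drop N.toNat := by
      have hDlen : (dDiffsN S N.toNat).length = N.toNat - 1 :=
        length_dDiffsN S N.toNat (by omega) (by omega)
      rw [List.drop_of_length_le (by omega), List.append_nil,
        show j0 + 1 = N.toNat by omega, List.take_append_drop]
    have hfold : (PySem.List.pyRange (N - 1) 0 (-1)).foldl stepB S
        = S.take 1 ++ dDiffsN S N.toNat ++ S.drop N.toNat := by
      conv_lhs => rw [hstart]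
      rw [show N - 1 = ((j0 : Int)) by omega]
      exact mutB_inv S N hN hN2 j0 (by omega)
    rw [hfold]
    unfold pvGapsSpec dDiffsN
    have hmax : (max N 1).toNat = N.toNat := by omega
    rw [hmax]
    have htake : S.take 1 = [S[0]'(by omega)] := by
      cases S with
      | nil => simp at h2
      | cons a t => simp
    rw [htake]
    simp only [List.cons_append, List.nil_append, List.tail_cons]


theorem enumFrom_mono {g : Int} {x : Int} :
    ∀ (fuel : Nat) (t : Int) (c : PySem.Set Int), x ∈ c → x ∈ enumFrom g fuel t c := by
  intro fuel
  induction fuel with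
  | zero => intro t c hx; exact hx
  | succ n ih =>
    intro t c hx
    rw [enumFrom]
    split
    · exact ih (t + 1) _ (by rw [PySem.Set.mem_add]; left; rw [PySem.Set.mem_add]; left; exact hx)
    · exact hx

theorem enumFrom_mem_self {g u : Int} :
    ∀ (fuel : Nat) (t : Int) (c : PySem.Set Int), 1 ≤ t → t ≤ u → (u - 1) * (u - 1) < g →
      (g + 1 - t).toNat < fuel → u ∈ enumFrom g fuel t c := by
  intro fuel
  induction fuel with
  | zero => intro t c _ _ _ hf; omega
  | succ n ih =>
    intro t c ht htu hu hf
    have hcond : (t - 1) * (t - 1) < g :=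
      lt_of_le_of_lt (mul_le_mul (by omega) (by omega) (by omega) (by omega : (0:Int) ≤ u - 1)) hu
    have htg : t ≤ g := enum_cond_le hcond
    rw [enumFrom, if_pos hcond]
    by_cases he : t = u
    · subst he
      exact enumFrom_mono n (t + 1) _
        (by rw [PySem.Set.mem_add]; left; rw [PySem.Set.mem_add]; right; rfl)
    · exact ih (t + 1) _ (by omega) (by omega) hu (by omega)

theorem enumFrom_mem_ceil {g u : Int} :
    ∀ (fuel : Nat) (t : Int) (c : PySem.Set Int), 1 ≤ t → t ≤ u → (u - 1) * (u - 1) < g →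
      (g + 1 - t).toNat < fuel → ceilDiv g u ∈ enumFrom g fuel t c := by
  intro fuel
  induction fuel with
  | zero => intro t c _ _ _ hf; omega
  | succ n ih =>
    intro t c ht htu hu hf
    have hcond : (t - 1) * (t - 1) < g :=
      lt_of_le_of_lt (mul_le_mul (by omega) (by omega) (by omega) (by omega : (0:Int) ≤ u - 1)) hu
    have htg : t ≤ g := enum_cond_le hcond
    rw [enumFrom, if_pos hcond]
    by_cases he : t = u
    · subst he
      exact enumFrom_mono n (t + 1) _ (by rw [PySem.Set.mem_add]; right; rfl)
    · exact ih (t + 1) _ (by omega) (by omega) hu (by omega)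

theorem enumFrom_bound {g : Int} {x : Int} :
    ∀ (fuel : Nat) (t : Int) (c : PySem.Set Int), 1 ≤ t → x ∈ enumFrom g fuel t c →
      x ∈ c ∨ (1 ≤ x ∧ x ≤ g) := by
  intro fuel
  induction fuel with
  | zero => intro t c _ hx; exact Or.inl hx
  | succ n ih =>
    intro t c ht hx
    rw [enumFrom] at hx
    by_cases hcond : (t - 1) * (t - 1) < g
    · rw [if_pos hcond] at hx
      have hg1 : 1 ≤ g := by nlinarith [mul_self_nonneg (t - 1)]
      have htg : t ≤ g := enum_cond_le hcond
      rcases ih (t + 1) _ (by omega) hx with h | h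
      · rw [PySem.Set.mem_add] at h
        rcases h with h | h
        · rw [PySem.Set.mem_add] at h
          rcases h with h | h
          · exact Or.inl h
          · subst h
            exact Or.inr ⟨by omega, htg⟩
        · subst h
          exact Or.inr ⟨ceil_pos hg1 (by omega), ceil_le_self (by omega) (by omega)⟩
      · exact Or.inr h
    · rw [if_neg hcond] at hx
      exact Or.inl hx

theorem foldl_enum_mono {zs : List Int} {x : Int} :
    ∀ c : PySem.Set Int, x ∈ c → x ∈ zs.foldl (fun c g => enumFrom g (g.toNat + 1) 1 c) c := by
  induction zs with
  | nil => intro c hx; exact hx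
  | cons g tl ih => intro c hx; exact ih _ (enumFrom_mono _ _ _ hx)

theorem foldl_enum_intro {zs : List Int} {x g0 : Int} (hg : g0 ∈ zs)
    (hmem : ∀ c : PySem.Set Int, x ∈ enumFrom g0 (g0.toNat + 1) 1 c) :
    ∀ c : PySem.Set Int, x ∈ zs.foldl (fun c g => enumFrom g (g.toNat + 1) 1 c) c := by
  induction zs with
  | nil => cases hg
  | cons g tl ih =>
    intro c
    rcases List.mem_cons.mp hg with h | h
    · subst h
      show x ∈ tl.foldl (fun c g => enumFrom g (g.toNat + 1) 1 c) (enumFrom g0 (g0.toNat + 1) 1 c)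
      exact foldl_enum_mono _ (hmem c)
    · exact ih h _

theorem foldl_enum_bound {zs : List Int} {x : Int} :
    ∀ c : PySem.Set Int, x ∈ zs.foldl (fun c g => enumFrom g (g.toNat + 1) 1 c) c →
      x ∈ c ∨ ∃ g ∈ zs, 1 ≤ x ∧ x ≤ g := by
  induction zs with
  | nil => intro c hx; exact Or.inl hx
  | cons g tl ih =>
    intro c hx
    rcases ih _ hx with h | h
    · rcases enumFrom_bound _ 1 c le_rfl h with h' | h'
      · exact Or.inl h'
      · exact Or.inr ⟨g, List.mem_cons_self, h'⟩
    · obtain ⟨g', hg', hb⟩ := h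
      exact Or.inr ⟨g', List.mem_cons_of_mem _ hg', hb⟩

theorem buildCands_bound {zs : List Int} {x : Int} (hx : x ∈ buildCands zs) :
    ∃ g ∈ zs, 1 ≤ x ∧ x ≤ g := by
  rcases foldl_enum_bound _ hx with h | h
  · cases h
  · exact h

theorem ceil_zero {d : Int} (hd : 1 ≤ d) : ceilDiv 0 d = 0 := by
  have h1 := (ceil_le_iff le_rfl hd).mpr (by nlinarith : (0:Int) ≤ 0 * d)
  have h2 := ceil_nonneg le_rfl hd
  omega

-- the least feasible value is always a generated candidate

-- the least feasible value is always a generated candidate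
theorem least_mem_cands {zs : List Int} {K d0 : Int} (hz : ∀ z ∈ zs, 0 ≤ z)
    (hex : ∃ z ∈ zs, 1 ≤ z) (hd1 : 1 ≤ d0) (hc : cutsB zs d0 ≤ K)
    (hleast : d0 = 1 ∨ (2 ≤ d0 ∧ ¬ cutsB zs (d0 - 1) ≤ K)) :
    d0 ∈ buildCands zs := by
  rcases hleast with h1 | ⟨hd2, hnl⟩
  · subst h1
    obtain ⟨g0, hg0m, hg01⟩ := hex
    exact foldl_enum_intro hg0m
      (fun c => enumFrom_mem_self (g0.toNat + 1) 1 c le_rfl le_rfl (by nlinarith) (by omega)) _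
  · have h' : cutsB zs ((d0 - 1) + 1) < cutsB zs (d0 - 1) := by
      rw [show d0 - 1 + 1 = d0 by ring]
      omega
    obtain ⟨z, hzm, hstrict⟩ := cuts_exists_strict hz (by omega : 1 ≤ d0 - 1) h'
    rw [show d0 - 1 + 1 = d0 by ring] at hstrict
    have hz0 : 0 ≤ z := hz z hzm
    have hz1 : 1 ≤ z := by
      by_contra hlt
      have hzz : z = 0 := by omega
      subst hzz
      rw [ceil_zero (by omega), ceil_zero (by omega)] at hstrict
      omega
    set v := ceilDiv z d0 with hv
    have hv1 : 1 ≤ v := ceil_pos hz1 hd1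
    have hle1 : ceilDiv z v ≤ d0 := by
      refine (ceil_le_iff hz0 hv1).mpr ?_
      have := ceil_refl_le hz0 hd1
      rw [← hv] at this
      nlinarith
    have hge1 : d0 ≤ ceilDiv z v := by
      by_contra hcon
      have h2 : ceilDiv z v ≤ d0 - 1 := by omega
      have h3 : z ≤ (d0 - 1) * v := (ceil_le_iff hz0 hv1).mp h2
      have h4 : ceilDiv z (d0 - 1) ≤ v := (ceil_le_iff hz0 (by omega)).mpr (by nlinarith)
      omega
    have hd0v : d0 = ceilDiv z v := le_antisymm hge1 hle1
    by_cases hsq : (v - 1) * (v - 1) < z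
    · rw [hd0v]
      exact foldl_enum_intro hzm
        (fun c => enumFrom_mem_ceil (z.toNat + 1) 1 c le_rfl hv1 hsq (by omega)) _
    · have hsq' : z ≤ (v - 1) * (v - 1) := Int.not_lt.mp hsq
      have hlow : (d0 - 1) * v < z := by
        by_contra hcon
        have : ceilDiv z v ≤ d0 - 1 := (ceil_le_iff hz0 hv1).mpr (by omega)
        omega
      have hwle : d0 ≤ v - 1 := by
        by_contra hcon
        have hvw : v ≤ d0 := by omega
        nlinarith [mul_le_mul_of_nonneg_right (show v - 1 ≤ d0 - 1 by omega)
          (show (0:Int) ≤ v by omega)]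
      have hsq2 : d0 * d0 ≤ z := by
        nlinarith [mul_le_mul_of_nonneg_left (show d0 + 1 ≤ v by omega)
          (show (0:Int) ≤ d0 - 1 by omega)]
      exact foldl_enum_intro hzm
        (fun c => enumFrom_mem_self (z.toNat + 1) 1 c le_rfl (by omega) (by nlinarith) (by omega)) _

-- the first match of find? on a sorted list is its least match
theorem find?_first_sorted {p : Int → Bool} :
    ∀ (cs : List Int), cs.Pairwise (fun a b => a ≤ b) → ∀ {x : Int}, cs.find? p = some x →
      p x = true ∧ x ∈ cs ∧ ∀ y ∈ cs, p y = true → x ≤ y := by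
  intro cs
  induction cs with
  | nil => intro _ x hx; cases hx
  | cons a tl ih =>
    intro hpair x hfind
    obtain ⟨hhead, htail⟩ := List.pairwise_cons.mp hpair
    by_cases hpa : p a = true
    · rw [List.find?_cons_of_pos hpa] at hfind
      cases hfind
      refine ⟨hpa, List.mem_cons_self, ?_⟩
      intro y hy _
      rcases List.mem_cons.mp hy with h | h
      · omega
      · exact hhead y h
    · rw [List.find?_cons_of_neg hpa] at hfind
      obtain ⟨hpx, hxm, hxmin⟩ := ih htail hfind
      refine ⟨hpx, List.mem_cons_of_mem _ hxm, ?_⟩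
      intro y hy hpy
      rcases List.mem_cons.mp hy with h | h
      · subst h; exact absurd hpy hpa
      · exact hxmin y h hpy


theorem no_small_feasible {zs : List Int} {K rv : Int} (hz : ∀ z ∈ zs, 0 ≤ z)
    (hex : ∃ z ∈ zs, 1 ≤ z)
    (hcands : ∀ x, x ∈ buildCands zs → cutsB zs x ≤ K → rv ≤ x) :
    ∀ (n : Nat) (d : Int), d.toNat = n → 1 ≤ d → d < rv → ¬ cutsB zs d ≤ K := by
  intro n
  induction n using Nat.strong_induction_on with
  | _ n ih =>
    intro d hdn hd1 hdr hcon
    by_cases hc1 : cutsB zs (d - 1) ≤ K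
    · by_cases hd2 : 2 ≤ d
      · exact ih (d - 1).toNat (by omega) (d - 1) rfl (by omega) (by omega) hc1
      · have hdeq : d = 1 := by omega
        have hmem := least_mem_cands hz hex hd1 hcon (Or.inl hdeq)
        have := hcands d hmem hcon
        omega
    · by_cases hd2 : 2 ≤ d
      · have hmem := least_mem_cands hz hex hd1 hcon (Or.inr ⟨hd2, hc1⟩)
        have := hcands d hmem hcon
        omega
      · have hdeq : d = 1 := by omega
        have hmem := least_mem_cands hz hex hd1 hcon (Or.inl hdeq)
        have := hcands d hmem hcon
        omega

theorem alt_isRes (N K : Int) (S : List Int) (h2 : 2 ≤ S.length) (hN : N ≤ (S.length : Int))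
    (hz : ∀ z ∈ pvGapsSpec N S, 0 ≤ z) (hex : ∃ z ∈ pvGapsSpec N S, 1 ≤ z)
    {top : Int} (htop : PySem.List.max? (pvGapsSpec N S) (fun z => z) = some top) :
    IsRes (pvGapsSpec N S) K top (solution_alt N K S) := by
  unfold solution_alt
  simp only
  rw [PySem.List.slice_from_one, mutB_tail S N h2 hN, htop]
  set zs := pvGapsSpec N S with hzs
  set cs := PySem.List.sorted (buildCands zs) (fun x => x) false with hcs
  have h1top : 1 ≤ top := by
    obtain ⟨z, hzm, hz1⟩ := hex
    have := PySem.List.max?_isMax htop z hzm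
    simp only at this
    omega
  have htople : ∀ z ∈ zs, z ≤ top := by
    intro z hzm
    have := PySem.List.max?_isMax htop z hzm
    simpa using this
  have hpair : cs.Pairwise (fun a b => a ≤ b) :=
    PySem.List.sorted_pairwise (buildCands zs) (fun x => x)
  have hmemcs : ∀ x, x ∈ cs ↔ x ∈ buildCands zs := fun x =>
    PySem.List.mem_sorted (buildCands zs) (fun x => x) false x
  unfold pickB
  cases hfind : cs.find? (fun d => decide (cutsB zs d ≤ K)) with
  | none =>
    simp only [Option.getD_none]
    have hall := List.find?_eq_none.mp hfind
    have hcands : ∀ y, y ∈ buildCands zs → cutsB zs y ≤ K → top + 1 ≤ y := by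
      intro y hy hcy
      exact absurd (decide_eq_true hcy) (by simpa using hall y ((hmemcs y).mpr hy))
    refine ⟨h1top, le_rfl, Or.inr rfl, ?_⟩
    intro d hd1 hdt
    exact no_small_feasible hz hex hcands d.toNat d rfl hd1 (by omega)
  | some x =>
    simp only [Option.getD_some]
    obtain ⟨hpx, hxmem, hxmin⟩ := find?_first_sorted cs hpair hfind
    have hfeas : cutsB zs x ≤ K := of_decide_eq_true hpx
    obtain ⟨g, hg, h1x, hxg⟩ := buildCands_bound ((hmemcs x).mp hxmem)
    have hcands : ∀ y, y ∈ buildCands zs → cutsB zs y ≤ K → x ≤ y := by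
      intro y hy hcy
      exact hxmin y ((hmemcs y).mpr hy) (decide_eq_true hcy)
    refine ⟨h1x, le_trans hxg (htople g hg), Or.inl hfeas, ?_⟩
    intro d hd1 hdx
    exact no_small_feasible hz hex hcands d.toNat d rfl hd1 hdx


theorem sol_isRes (N K : Int) (S : List Int) (h2 : 2 ≤ S.length) (hN : N ≤ (S.length : Int))
    (hz : ∀ z ∈ pvGapsSpec N S, 0 ≤ z) (hex : ∃ z ∈ pvGapsSpec N S, 1 ≤ z)
    {top : Int} (htop : PySem.List.max? (pvGapsSpec N S) (fun z => z) = some top) :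
    IsRes (pvGapsSpec N S) K top (solution N K S) := by
  have h1top : 1 ≤ top := by
    obtain ⟨z, hzm, hz1⟩ := hex
    have := PySem.List.max?_isMax htop z hzm
    simp only at this
    omega
  unfold solution
  simp only
  set T := ((PySem.List.pyRange 1 N).foldl stepA (S, PySem.List.pyGetD S 0 0)).1 with hT
  have htail : T.tail = pvGapsSpec N S := mutation_tail S N h2 hN
  rw [PySem.List.slice_from_one, htail, htop]
  exact loopA_isRes (pvGapsSpec N S) K top T htail hz ((top - 1).toNat + 1) 1 top
    (by omega) le_rfl h1top le_rfl (Or.inr rfl) (fun d hd1 hdl => absurd hdl (by omega))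

theorem sol_eq_alt (N K : Int) (S : List Int) (h2 : 2 ≤ S.length) (hN : N ≤ (S.length : Int))
    (hz : ∀ z ∈ pvGapsSpec N S, 0 ≤ z) (hex : ∃ z ∈ pvGapsSpec N S, 1 ≤ z) :
    solution N K S = solution_alt N K S := by
  have hne : pvGapsSpec N S ≠ [] := by
    obtain ⟨z, hzm, _⟩ := hex
    intro h
    rw [h] at hzm
    cases hzm
  obtain ⟨top, htop⟩ : ∃ t, PySem.List.max? (pvGapsSpec N S) (fun z => z) = some t := by
    cases hmax : PySem.List.max? (pvGapsSpec N S) (fun z => z) with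
    | none => exact absurd ((PySem.List.max?_eq_none_iff _ _).mp hmax) hne
    | some t => exact ⟨t, rfl⟩
  exact isRes_unique (sol_isRes N K S h2 hN hz hex htop)
    (alt_isRes N K S h2 hN hz hex htop)

-- ===== VERDICT (by name: the statement is the Claim_ definition above) =====
theorem solution_spec : Claim_equal_solution := by
  intro N K S hdom hpre
  unfold Spec_solution
  unfold Pre_solution at hpre
  obtain ⟨h2, hN, hz, hex⟩ := hpre
  exact sol_eq_alt N K S h2 hN hz hex
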